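-- pv_equiv track=rewrite | github.com/cottozen/advent-of-code | 2024/day9/main.py | create_space_heap
-- ===== SOURCE A (Python) =====
-- def create_space_heap(blocks: list[str]):
--     free_space, chunck_start = 0, 0
--     space_heap = []
--     for i in range(len(blocks)):
--         if free_space == 0:
--             chunck_start = i
--         if blocks[i] == ".":
--             free_space += 1
--             continue
--         if free_space > 0:
--             space_heap.append((chunck_start, i))
--             free_space = 0
--     return space_heap
-- ===== SOURCE B (Python) =====
-- def create_space_heap(blocks: list[str]):
--     # gap-scan over the indices of non-dot blocks: a free chunk is the gap
--     # between consecutive solid positions (a trailing dot run has no following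
--     # solid position, so it is never emitted)
--     solid = [i for i, b in enumerate(blocks) if b != "."]
--     space_heap = []
--     prev = -1
--     for p in solid:
--         if p - prev > 1:
--             space_heap.append((prev + 1, p))
--         prev = p
--     return space_heap
-- ===== Notes on version B (the rewrite author's own statement) =====
-- stated objective: alternative
-- what changed: Replaces A's free-space counter/chunk-start state machine with a filter of the non-dot indices followed by a gap scan between consecutive solid positions (trailing dot runs drop out for free instead of by the leftover-state rule).
import Mathlib
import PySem

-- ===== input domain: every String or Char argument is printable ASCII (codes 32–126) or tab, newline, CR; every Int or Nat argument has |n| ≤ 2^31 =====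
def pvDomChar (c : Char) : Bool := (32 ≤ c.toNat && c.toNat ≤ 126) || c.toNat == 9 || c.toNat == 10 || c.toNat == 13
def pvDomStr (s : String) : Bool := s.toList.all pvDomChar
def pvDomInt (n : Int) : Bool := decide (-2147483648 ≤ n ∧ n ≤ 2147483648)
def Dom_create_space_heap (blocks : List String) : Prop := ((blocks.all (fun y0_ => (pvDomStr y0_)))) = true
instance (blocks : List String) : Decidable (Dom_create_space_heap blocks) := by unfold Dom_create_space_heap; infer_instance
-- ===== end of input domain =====

-- ===== PORT A =====
-- Header: B replaces A's counter/chunk-start state machine with a filter of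
-- non-dot indices and a gap scan between consecutive solid positions
-- (objective: alternative algorithm, same cost).

-- A's loop body (one iteration of the for-loop, state = (free_space, chunck_start, space_heap))
def pvStepA (st : Int × Int × List (Int × Int)) (p : Int × String) : Int × Int × List (Int × Int) :=
  let cs := if st.1 == 0 then p.1 else st.2.1
  if p.2 == "." then (st.1 + 1, cs, st.2.2)
  else if st.1 > 0 then (0, cs, st.2.2 ++ [(cs, p.1)])
  else (st.1, cs, st.2.2)

def create_space_heap (blocks : List String) : List (Int × Int) :=
  ((PySem.List.pyRange 0 (PySem.List.len blocks) 1).foldl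
    (fun st i => pvStepA st (i, PySem.List.pyGetD blocks i "")) (0, 0, [])).2.2

-- ===== PORT B =====
-- B's loop body (state = (space_heap, prev))
def pvStepB (st : List (Int × Int) × Int) (p : Int) : List (Int × Int) × Int :=
  if p - st.2 > 1 then (st.1 ++ [(st.2 + 1, p)], p) else (st.1, p)

def create_space_heap_alt (blocks : List String) : List (Int × Int) :=
  let solid := ((PySem.List.enumerate blocks 0).filter (fun p => p.2 ≠ ".")).map (fun p => p.1)
  (solid.foldl pvStepB ([], -1)).1

-- ===== PRECONDITION & SPEC =====
def Spec_create_space_heap (blocks : List String) (out : List (Int × Int)) : Prop := out = create_space_heap_alt blocks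
instance (blocks : List String) (out : List (Int × Int)) : Decidable (Spec_create_space_heap blocks out) := by unfold Spec_create_space_heap; infer_instance

-- ===== CLAIM (what is proved, stated in full; the proofs are below) =====
def Claim_equal_create_space_heap : Prop := ∀ (blocks : List String), Dom_create_space_heap blocks → Spec_create_space_heap blocks (create_space_heap blocks)

-- ===== LEMMAS AND PROOFS =====

-- invariant: 0 ≤ free_space = s - prev - 1 and (free_space ≠ 0 → chunck_start = prev + 1)
lemma pv_main (l : List String) : ∀ (s fs cs prev : Int) (heap : List (Int × Int)),
    0 ≤ fs → fs = s - prev - 1 → (fs ≠ 0 → cs = prev + 1) →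
    ((PySem.List.enumerate l s).foldl pvStepA (fs, cs, heap)).2.2
      = ((((PySem.List.enumerate l s).filter (fun p => p.2 ≠ ".")).map (fun p => p.1)).foldl
          pvStepB (heap, prev)).1 := by
  induction l with
  | nil => intro s fs cs prev heap h0 h1 h2; simp [PySem.List.enumerate_nil]
  | cons b l ih =>
    intro s fs cs prev heap h0 h1 h2
    simp only [PySem.List.enumerate_cons, List.foldl_cons, List.filter_cons]
    by_cases hb : b = "."
    · subst hb
      rw [if_neg (by simp)]
      by_cases hfs : fs = 0
      · have hstep : pvStepA (fs, cs, heap) (s, ".") = (fs + 1, s, heap) := by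
          simp [pvStepA, hfs]
        rw [hstep]
        exact ih (s+1) (fs+1) s prev heap (by omega) (by omega) (fun _ => by omega)
      · have hstep : pvStepA (fs, cs, heap) (s, ".") = (fs + 1, cs, heap) := by
          simp [pvStepA, hfs]
        rw [hstep]
        exact ih (s+1) (fs+1) cs prev heap (by omega) (by omega) (fun _ => h2 hfs)
    · rw [if_pos (by simp [hb])]
      simp only [List.map_cons, List.foldl_cons]
      by_cases hfs : fs = 0
      · have hstepA : pvStepA (fs, cs, heap) (s, b) = (fs, s, heap) := by
          simp [pvStepA, hfs, hb]
        have hstepB : pvStepB (heap, prev) s = (heap, s) := by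
          simp only [pvStepB]; rw [if_neg (by omega)]
        rw [hstepA, hstepB, hfs]
        exact ih (s+1) 0 s s heap (by omega) (by omega) (fun h => absurd rfl h)
      · have hfspos : 0 < fs := by omega
        have hstepA : pvStepA (fs, cs, heap) (s, b) = (0, cs, heap ++ [(cs, s)]) := by
          simp [pvStepA, hfs, hb, hfspos]
        have hstepB : pvStepB (heap, prev) s = (heap ++ [(prev + 1, s)], s) := by
          simp only [pvStepB]; rw [if_pos (by omega)]
        rw [hstepA, hstepB, h2 hfs]
        exact ih (s+1) 0 (prev+1) s (heap ++ [(prev + 1, s)]) (by omega) (by omega)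
          (fun h => absurd rfl h)

lemma pv_A_enum (blocks : List String) :
    create_space_heap blocks
      = ((PySem.List.enumerate blocks 0).foldl pvStepA (0, 0, [])).2.2 := by
  rw [create_space_heap, PySem.List.enumerate_eq_map_pyRange (d := ""), List.foldl_map]

-- ===== VERDICT (by name: the statement is the Claim_ definition above) =====
theorem create_space_heap_spec : Claim_equal_create_space_heap := by
  intro blocks _
  unfold Spec_create_space_heap create_space_heap_alt
  rw [pv_A_enum]
  exact pv_main blocks 0 0 0 (-1) [] (by omega) (by omega) (by omega)
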